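-- pv_equiv track=rewrite | github.com/canaokar/rag-module | lab-03-chunking/solution/step3.py | recursive_chunk
-- ===== SOURCE A (Python) =====
-- TARGET_WORDS = 200
--
-- def split_paragraphs(text):
--     """Split text into paragraphs (separated by blank lines)."""
--     raw_paragraphs = text.split("\n\n")
--     return [p.strip() for p in raw_paragraphs if p.strip()]
--
-- def split_sentences(text):
--     """Split text into sentences (on '. ' boundaries)."""
--     raw_parts = text.replace("\n", " ").split(". ")
--     sentences = []
--     for part in raw_parts:
--         cleaned = part.strip()
--         if cleaned:
--             if not cleaned.endswith("."):
--                 cleaned += "."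
--             sentences.append(cleaned)
--     return sentences
--
-- def recursive_chunk(text, target_words=TARGET_WORDS):
--     """Recursively chunk text to meet the target word count."""
--     paragraphs = split_paragraphs(text)
--     small_pieces = []
--
--     for para in paragraphs:
--         word_count = len(para.split())
--         if word_count <= target_words:
--             small_pieces.append(para)
--         else:
--             # Paragraph is too large, split into sentences
--             sentences = split_sentences(para)
--             for sentence in sentences:
--                 sw_count = len(sentence.split())
--                 if sw_count <= target_words:
--                     small_pieces.append(sentence)
--                 else:
--                     # Sentence is too large, split by words
--                     words = sentence.split()
--                     for i in range(0, len(words), target_words):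
--                         piece = " ".join(words[i : i + target_words])
--                         small_pieces.append(piece)
--
--     # Merge small consecutive pieces until they approach target_words
--     chunks = []
--     current_chunk = []
--     current_word_count = 0
--
--     for piece in small_pieces:
--         piece_words = len(piece.split())
--         if current_word_count + piece_words > target_words and current_chunk:
--             chunks.append("\n\n".join(current_chunk))
--             current_chunk = [piece]
--             current_word_count = piece_words
--         else:
--             current_chunk.append(piece)
--             current_word_count += piece_words
--
--     if current_chunk:
--         chunks.append("\n\n".join(current_chunk))
--
--     return chunks
-- ===== SOURCE B (Python) =====
-- TARGET_WORDS = 200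
--
-- def split_paragraphs(text):
--     """Split text into paragraphs (separated by blank lines)."""
--     raw_paragraphs = text.split("\n\n")
--     return [p.strip() for p in raw_paragraphs if p.strip()]
--
-- def split_sentences(text):
--     """Split text into sentences (on '. ' boundaries)."""
--     raw_parts = text.replace("\n", " ").split(". ")
--     sentences = []
--     for part in raw_parts:
--         cleaned = part.strip()
--         if cleaned:
--             if not cleaned.endswith("."):
--                 cleaned += "."
--             sentences.append(cleaned)
--     return sentences
--
-- def split_word_groups(text, target_words):
--     """Split text into groups of at most target_words words."""
--     words = text.split()
--     return [" ".join(words[i : i + target_words]) for i in range(0, len(words), target_words)]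
--
-- def subdivide(text, splitters, target_words):
--     """Return [text] if small enough (or nothing left to split with),
--     else split with the first splitter and recurse with the rest."""
--     if not splitters or len(text.split()) <= target_words:
--         return [text]
--     return [piece
--             for part in splitters[0](text)
--             for piece in subdivide(part, splitters[1:], target_words)]
--
-- def merge_pieces(pieces, current_chunk, current_word_count, target_words):
--     """Greedily merge consecutive pieces up to target_words, recursively."""
--     if not pieces:
--         return ["\n\n".join(current_chunk)] if current_chunk else []
--     piece = pieces[0]
--     piece_words = len(piece.split())
--     if current_word_count + piece_words > target_words and current_chunk:
--         return ["\n\n".join(current_chunk)] + merge_pieces(pieces[1:], [piece], piece_words, target_words)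
--     return merge_pieces(pieces[1:], current_chunk + [piece], current_word_count + piece_words, target_words)
--
-- def recursive_chunk(text, target_words=TARGET_WORDS):
--     """Recursively chunk text to meet the target word count."""
--     splitters = [split_sentences, lambda t: split_word_groups(t, target_words)]
--     small_pieces = [piece
--                     for para in split_paragraphs(text)
--                     for piece in subdivide(para, splitters, target_words)]
--     return merge_pieces(small_pieces, [], 0, target_words)
-- ===== Notes on version B (the rewrite author's own statement) =====
-- stated objective: alternative
-- what changed: The hard-coded paragraph/sentence/word-group nesting is replaced by one recursive subdivide over a list of splitters (sentence splitter, then word grouper), small pieces are collected by flatMap comprehensions instead of nested append loops, and the greedy merge is a structural recursion instead of a fold over a (chunks, current, count) state triple.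
-- outside the precondition, e.g. on recursive_chunk('   ', 0): A returns [], B returns []
import Mathlib
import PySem

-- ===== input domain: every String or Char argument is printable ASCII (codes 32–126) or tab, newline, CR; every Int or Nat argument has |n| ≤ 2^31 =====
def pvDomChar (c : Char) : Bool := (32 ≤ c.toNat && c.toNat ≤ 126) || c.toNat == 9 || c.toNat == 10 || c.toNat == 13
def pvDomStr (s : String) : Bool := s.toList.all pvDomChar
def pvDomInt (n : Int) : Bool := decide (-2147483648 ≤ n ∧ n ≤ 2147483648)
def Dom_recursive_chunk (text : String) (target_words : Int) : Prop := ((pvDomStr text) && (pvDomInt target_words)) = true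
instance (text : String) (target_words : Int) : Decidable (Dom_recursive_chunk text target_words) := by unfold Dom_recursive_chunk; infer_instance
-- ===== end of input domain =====

-- B replaces A's hard-coded two-level nested split loops by a recursive `subdivide` over a
-- list of splitters and the merge loop by a structural recursion (objective: alternative).

-- ===== PORT A =====
-- shared helper: [p.strip() for p in text.split("\n\n") if p.strip()]
-- (split? with the nonempty literal separator is always `some`; the getD default is never taken)
def split_paragraphs (text : String) : List String :=
  ((PySem.Str.split? text "\n\n").getD []).filterMap (fun p =>
    let c := PySem.Str.strip p
    if c ≠ "" then some c else none)

-- shared helper: sentence splitting with '.'-normalisation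
def split_sentences (text : String) : List String :=
  ((PySem.Str.split? (PySem.Str.replace text "\n" " ") ". ").getD []).foldl (fun sentences part =>
    let cleaned := PySem.Str.strip part
    if cleaned ≠ "" then
      let cleaned := if !(PySem.Str.endswith cleaned ".") then cleaned ++ "." else cleaned
      sentences ++ [cleaned]
    else sentences) []

-- the merge loop's step function (the body of A's 'for piece in small_pieces' loop)
def merge_step (target_words : Int) (st : List String × List String × Int) (piece : String) : List String × List String × Int :=
  if st.2.2 + ((PySem.Str.split₀ piece).length : Int) > target_words ∧ st.2.1 ≠ [] then
    (st.1 ++ [PySem.Str.join "\n\n" st.2.1], [piece], ((PySem.Str.split₀ piece).length : Int))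
  else
    (st.1, st.2.1 ++ [piece], st.2.2 + ((PySem.Str.split₀ piece).length : Int))

def recursive_chunk (text : String) (target_words : Int) : List String :=
  let paragraphs := split_paragraphs text
  let small_pieces := paragraphs.foldl (fun acc para =>
    if ((PySem.Str.split₀ para).length : Int) ≤ target_words then acc ++ [para]
    else
      (split_sentences para).foldl (fun acc2 sentence =>
        if ((PySem.Str.split₀ sentence).length : Int) ≤ target_words then acc2 ++ [sentence]
        else
          (PySem.List.pyRange 0 (PySem.Str.split₀ sentence).length target_words).foldl (fun acc3 i =>
            acc3 ++ [PySem.Str.join " " (PySem.List.slice (PySem.Str.split₀ sentence) (some i) (some (i + target_words)))]) acc2) acc) []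
  let st := small_pieces.foldl (merge_step target_words) ([], [], 0)
  if st.2.1 ≠ [] then st.1 ++ [PySem.Str.join "\n\n" st.2.1] else st.1

-- ===== PORT B =====
-- groups of at most target_words words, each re-joined with single spaces
def split_word_groups (text : String) (target_words : Int) : List String :=
  (PySem.List.pyRange 0 (PySem.Str.split₀ text).length target_words).map (fun i =>
    PySem.Str.join " " (PySem.List.slice (PySem.Str.split₀ text) (some i) (some (i + target_words))))

-- keep the text whole if small enough (or no splitter left), else split and recurse
def subdivide (splitters : List (String → List String)) (target_words : Int) (text : String) : List String :=
  match splitters with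
  | [] => [text]
  | f :: rest =>
    if ((PySem.Str.split₀ text).length : Int) ≤ target_words then [text]
    else (f text).flatMap (fun part => subdivide rest target_words part)

-- greedy merge of consecutive pieces, as a structural recursion
def merge_pieces (target_words : Int) : List String → List String → Int → List String
  | [], current_chunk, _ =>
    if current_chunk ≠ [] then [PySem.Str.join "\n\n" current_chunk] else []
  | piece :: rest, current_chunk, current_word_count =>
    if current_word_count + ((PySem.Str.split₀ piece).length : Int) > target_words ∧ current_chunk ≠ [] then
      PySem.Str.join "\n\n" current_chunk :: merge_pieces target_words rest [piece] ((PySem.Str.split₀ piece).length : Int)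
    else
      merge_pieces target_words rest (current_chunk ++ [piece]) (current_word_count + ((PySem.Str.split₀ piece).length : Int))

def recursive_chunk_alt (text : String) (target_words : Int) : List String :=
  let splitters := [split_sentences, fun t => split_word_groups t target_words]
  let small_pieces := (split_paragraphs text).flatMap (fun para => subdivide splitters target_words para)
  merge_pieces target_words small_pieces [] 0

-- ===== PRECONDITION & SPEC =====
-- Pre_ excludes target_words = 0: there A raises ValueError (range() with step 0) on any text
-- containing a word, and returns [] only on whitespace-only text (where B returns [] too).
def Pre_recursive_chunk (text : String) (target_words : Int) : Prop := target_words ≠ 0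
instance (text : String) (target_words : Int) : Decidable (Pre_recursive_chunk text target_words) := by unfold Pre_recursive_chunk; infer_instance
def pvWitness_recursive_chunk : String × Int := ("Hello world. Bye now.\n\nNext para.", 3)

def Spec_recursive_chunk (text : String) (target_words : Int) (out : List String) : Prop := out = recursive_chunk_alt text target_words
instance (text : String) (target_words : Int) (out : List String) : Decidable (Spec_recursive_chunk text target_words out) := by unfold Spec_recursive_chunk; infer_instance

-- ===== CLAIM (what is proved, stated in full; the proofs are below) =====
def Claim_equal_recursive_chunk : Prop := ∀ (text : String) (target_words : Int), Dom_recursive_chunk text target_words → Pre_recursive_chunk text target_words → Spec_recursive_chunk text target_words (recursive_chunk text target_words)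

-- ===== LEMMAS AND PROOFS =====

-- A's per-paragraph splitting equals B's subdivide with the two splitters
theorem subdivide_eq (t : Int) (para : String) :
    subdivide [split_sentences, fun s => split_word_groups s t] t para =
      (if ((PySem.Str.split₀ para).length : Int) ≤ t then [para]
       else (split_sentences para).flatMap (fun s =>
         if ((PySem.Str.split₀ s).length : Int) ≤ t then [s] else split_word_groups s t)) := by
  simp only [subdivide]
  split
  · rfl
  · congr 1
    funext s
    split
    · rfl
    · simp

-- A's inner sentence loop accumulates the flatMap of per-sentence pieces
theorem sentence_loop_eq (t : Int) (ss : List String) (acc : List String) :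
    ss.foldl (fun acc2 sentence =>
        if ((PySem.Str.split₀ sentence).length : Int) ≤ t then acc2 ++ [sentence]
        else
          (PySem.List.pyRange 0 (PySem.Str.split₀ sentence).length t).foldl (fun acc3 i =>
            acc3 ++ [PySem.Str.join " " (PySem.List.slice (PySem.Str.split₀ sentence) (some i) (some (i + t)))]) acc2) acc
    = acc ++ ss.flatMap (fun s =>
        if ((PySem.Str.split₀ s).length : Int) ≤ t then [s] else split_word_groups s t) := by
  induction ss generalizing acc with
  | nil => simp
  | cons s ss ihs =>
    simp only [List.foldl_cons, List.flatMap_cons, ihs]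
    rw [← List.append_assoc]
    congr 1
    split
    · rfl
    · rw [PySem.List.foldl_append_singleton_eq_map]
      rfl

-- A's split-phase foldl accumulates exactly the flatMap of per-paragraph pieces
theorem splitA_eq (t : Int) (ps : List String) (acc : List String) :
    ps.foldl (fun acc para =>
      if ((PySem.Str.split₀ para).length : Int) ≤ t then acc ++ [para]
      else
        (split_sentences para).foldl (fun acc2 sentence =>
          if ((PySem.Str.split₀ sentence).length : Int) ≤ t then acc2 ++ [sentence]
          else
            (PySem.List.pyRange 0 (PySem.Str.split₀ sentence).length t).foldl (fun acc3 i =>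
              acc3 ++ [PySem.Str.join " " (PySem.List.slice (PySem.Str.split₀ sentence) (some i) (some (i + t)))]) acc2) acc) acc
    = acc ++ ps.flatMap (fun para => subdivide [split_sentences, fun s => split_word_groups s t] t para) := by
  induction ps generalizing acc with
  | nil => simp
  | cons p ps ih =>
    simp only [List.foldl_cons, List.flatMap_cons, ih, subdivide_eq]
    rw [← List.append_assoc]
    congr 1
    split
    · rfl
    · rw [sentence_loop_eq]

-- A's merge foldl-plus-flush equals B's recursive merge_pieces
theorem merge_eq (t : Int) (pieces : List String) (chunks current_chunk : List String) (cnt : Int) :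
    (if (pieces.foldl (merge_step t) (chunks, current_chunk, cnt)).2.1 ≠ [] then
       (pieces.foldl (merge_step t) (chunks, current_chunk, cnt)).1
         ++ [PySem.Str.join "\n\n" (pieces.foldl (merge_step t) (chunks, current_chunk, cnt)).2.1]
     else (pieces.foldl (merge_step t) (chunks, current_chunk, cnt)).1)
    = chunks ++ merge_pieces t pieces current_chunk cnt := by
  induction pieces generalizing chunks current_chunk cnt with
  | nil =>
    simp only [List.foldl_nil, merge_pieces]
    split <;> simp_all
  | cons p ps ih =>
    simp only [List.foldl_cons, merge_pieces, merge_step]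
    by_cases h : cnt + ((PySem.Str.split₀ p).length : Int) > t ∧ current_chunk ≠ []
    · simp only [if_pos h, ih, List.append_assoc, List.singleton_append]
    · simp only [if_neg h, ih]

-- ===== VERDICT (by name: the statement is the Claim_ definition above) =====
theorem recursive_chunk_spec : Claim_equal_recursive_chunk := by
  intro text t _ _
  unfold Spec_recursive_chunk
  simp only [recursive_chunk, recursive_chunk_alt]
  rw [splitA_eq t (split_paragraphs text) [], List.nil_append]
  rw [merge_eq t _ [] [] 0, List.nil_append]
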